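-- pv_equiv track=rewrite | github.com/gnsalok/algo-ds-python | Leetcode-python/+Problems/+Interview/Interview/findValidC.py | findValidC
-- ===== SOURCE A (Python) =====
-- from typing import List
--
-- def findValidC(cp : List[int]) -> int:
--     list = []
--
--     for c in cp:
--         stack = []
--         for i in range(0, len(c)):
--             if(not len(stack)==0 and stack[len(stack)-1] == c[i]):
--                 stack.pop()
--             else:
--                 stack.append(c[i])
--
--         if(len(stack) == 0):
--             list.append(1)
--         else:
--             list.append(0)
--     return list
-- ===== SOURCE B (Python) =====
-- from typing import List
--
-- def findValidC(cp : List[int]) -> int: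
--     out = []
--     for c in cp:
--         work = list(c)
--         changed = True
--         while changed:
--             changed = False
--             i = 0
--             while i + 1 < len(work):
--                 if work[i] == work[i + 1]:
--                     del work[i:i + 2]
--                     changed = True
--                     break
--                 i += 1
--         out.append(1 if not work else 0)
--     return out
-- ===== Notes on version B (the rewrite author's own statement) =====
-- stated objective: alternative
-- what changed: B reduces each sequence by repeatedly scanning for the first adjacent equal pair and deleting it until no pair remains, then tests emptiness, instead of A's single left-to-right stack pass.
import Mathlib
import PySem

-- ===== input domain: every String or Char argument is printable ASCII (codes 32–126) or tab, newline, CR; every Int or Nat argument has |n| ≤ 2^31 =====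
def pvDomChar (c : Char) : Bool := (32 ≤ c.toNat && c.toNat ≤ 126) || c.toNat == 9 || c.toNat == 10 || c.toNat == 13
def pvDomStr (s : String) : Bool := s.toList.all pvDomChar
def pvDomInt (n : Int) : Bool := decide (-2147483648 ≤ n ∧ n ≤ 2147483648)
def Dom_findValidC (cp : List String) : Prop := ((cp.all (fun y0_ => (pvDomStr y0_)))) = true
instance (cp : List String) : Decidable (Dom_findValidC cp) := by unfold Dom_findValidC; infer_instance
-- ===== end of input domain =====

-- B replaces A's single stack pass by repeated deletion of the first adjacent equal
-- pair (same results; B is an alternative, not faster).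

-- ===== PORT A =====
-- Python's stack appends/pops/checks at its end; here the stack top is the list head.
def pvPush (s : List Char) (c : Char) : List Char :=
  match s with
  | [] => [c]
  | t :: rest => if t = c then rest else c :: t :: rest

def pvStackRun (s : List Char) (l : List Char) : List Char :=
  l.foldl pvPush s

def findValidC (cp : List String) : List Int :=
  cp.map (fun c => if (pvStackRun [] c.toList).length = 0 then (1 : Int) else 0)

-- ===== PORT B =====
-- inner scan: first adjacent equal pair, deleted
def pvFindAdj : List Char → Option (List Char)
  | a :: b :: rest => if a = b then some rest else (pvFindAdj (b :: rest)).map (a :: ·)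
  | _ => none

theorem pvFindAdj_length : ∀ (l l' : List Char), pvFindAdj l = some l' → l'.length < l.length := by
  intro l
  induction l with
  | nil => intro l' h; simp [pvFindAdj] at h
  | cons a t ih =>
    intro l' h
    match t, h with
    | b :: rest, h =>
      simp only [pvFindAdj] at h
      split at h
      · cases h; simp
      · simp only [Option.map_eq_some_iff] at h
        obtain ⟨m, hm, rfl⟩ := h
        have := ih m hm
        simpa using Nat.succ_lt_succ this

-- outer loop: rescan from the start after each deletion, until no pair is found
def pvReduceFull (l : List Char) : List Char :=
  match h : pvFindAdj l with
  | some l' => pvReduceFull l'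
  | none => l
termination_by l.length
decreasing_by exact pvFindAdj_length _ _ h

def findValidC_alt (cp : List String) : List Int :=
  cp.map (fun c => if pvReduceFull c.toList = [] then (1 : Int) else 0)

-- ===== PRECONDITION & SPEC =====
def Spec_findValidC (cp : List String) (out : List Int) : Prop := out = findValidC_alt cp
instance (cp : List String) (out : List Int) : Decidable (Spec_findValidC cp out) := by unfold Spec_findValidC; infer_instance

-- ===== CLAIM (what is proved, stated in full; the proofs are below) =====
def Claim_equal_findValidC : Prop := ∀ (cp : List String), Dom_findValidC cp → Spec_findValidC cp (findValidC cp)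

-- ===== LEMMAS AND PROOFS =====

-- A's stack never holds two equal adjacent characters
theorem pvPush_chain {s : List Char} (hs : List.IsChain (· ≠ ·) s) (c : Char) :
    List.IsChain (· ≠ ·) (pvPush s c) := by
  match s, hs with
  | [], _ => simpa [pvPush] using List.isChain_singleton c
  | t :: rest, hs =>
    simp only [pvPush]
    split
    · exact hs.tail
    · exact List.isChain_cons_cons.mpr ⟨by simp_all [eq_comm], hs⟩

-- pushing the same character twice onto an irredundant stack is the identity
theorem pvPush_push {s : List Char} (hs : List.IsChain (· ≠ ·) s) (c : Char) :
    pvPush (pvPush s c) c = s := by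
  match s, hs with
  | [], _ => simp [pvPush]
  | t :: rest, hs =>
    by_cases htc : t = c
    · subst htc
      match rest, hs with
      | [], _ => simp [pvPush]
      | e :: es, hs =>
        have hte : t ≠ e := (List.isChain_cons_cons.mp hs).1
        simp [pvPush, Ne.symm hte]
    · simp [pvPush, htc]

theorem pvStackRun_cons (s : List Char) (c : Char) (l : List Char) :
    pvStackRun s (c :: l) = pvStackRun (pvPush s c) l := rfl

-- deleting an adjacent equal pair does not change A's stack run
theorem pvStackRun_findAdj :
    ∀ (l l' s : List Char), List.IsChain (· ≠ ·) s → pvFindAdj l = some l' →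
      pvStackRun s l = pvStackRun s l' := by
  intro l
  induction l with
  | nil => intro l' s _ h; simp [pvFindAdj] at h
  | cons a t ih =>
    intro l' s hs h
    match t, h with
    | b :: rest, h =>
      simp only [pvFindAdj] at h
      split at h
      · cases h
        subst_eqs
        rw [pvStackRun_cons, pvStackRun_cons, pvPush_push hs]
      · simp only [Option.map_eq_some_iff] at h
        obtain ⟨m, hm, rfl⟩ := h
        rw [pvStackRun_cons, pvStackRun_cons]
        exact ih m (pvPush s a) (pvPush_chain hs a) hm

-- the reduced word has no adjacent equal pair
theorem pvFindAdj_none_chain :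
    ∀ (l : List Char), pvFindAdj l = none → List.IsChain (· ≠ ·) l := by
  intro l
  induction l with
  | nil => intro _; exact List.IsChain.nil
  | cons a t ih =>
    intro h
    match t with
    | [] => exact List.isChain_singleton a
    | b :: rest =>
      simp only [pvFindAdj] at h
      split at h
      · exact absurd h (by simp)
      · rename_i hab
        have : pvFindAdj (b :: rest) = none := by
          cases hfa : pvFindAdj (b :: rest) with
          | none => rfl
          | some m => rw [hfa] at h; simp at h
        exact List.isChain_cons_cons.mpr ⟨hab, ih this⟩

-- running A's stack over an irredundant word just reverses it onto the stack
theorem pvStackRun_chain :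
    ∀ (w s : List Char), List.IsChain (· ≠ ·) (w.reverse ++ s) →
      pvStackRun s w = w.reverse ++ s := by
  intro w
  induction w with
  | nil => intro s _; simp [pvStackRun]
  | cons c cs ih =>
    intro s h
    have hre : (c :: cs).reverse ++ s = cs.reverse ++ (c :: s) := by
      simp
    rw [hre] at h
    have hcs : List.IsChain (· ≠ ·) (c :: s) := (List.isChain_append.mp h).2.1
    have hpush : pvPush s c = c :: s := by
      match s with
      | [] => simp [pvPush]
      | d :: ds =>
        have hcd : c ≠ d := (List.isChain_cons_cons.mp hcs).1
        simp [pvPush, Ne.symm hcd]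
    rw [pvStackRun_cons, hpush, ih (c :: s) h, hre]

-- pvReduceFull reaches a fixed point of pvFindAdj and preserves the stack run
theorem pvReduceFull_spec (l : List Char) :
    pvFindAdj (pvReduceFull l) = none ∧
      ∀ (s : List Char), List.IsChain (· ≠ ·) s → pvStackRun s l = pvStackRun s (pvReduceFull l) := by
  induction l using pvReduceFull.induct with
  | case1 l l' h ih =>
    rw [pvReduceFull, h]
    refine ⟨ih.1, fun s hs => ?_⟩
    rw [pvStackRun_findAdj l l' s hs h]
    exact ih.2 s hs
  | case2 l h =>
    rw [pvReduceFull, h]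
    exact ⟨h, fun _ _ => rfl⟩

-- per-string agreement: stack empties iff full pair-deletion empties
theorem pv_string_agree (l : List Char) :
    (if (pvStackRun [] l).length = 0 then (1 : Int) else 0)
      = (if pvReduceFull l = [] then (1 : Int) else 0) := by
  obtain ⟨hfix, hrun⟩ := pvReduceFull_spec l
  have hchain : List.IsChain (· ≠ ·) (pvReduceFull l) := pvFindAdj_none_chain _ hfix
  have h1 : pvStackRun [] l = (pvReduceFull l).reverse := by
    rw [hrun [] List.IsChain.nil]
    have hrev : List.IsChain (· ≠ ·) ((pvReduceFull l).reverse) :=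
      List.isChain_reverse.mpr (by simpa [ne_comm] using hchain)
    have := pvStackRun_chain (pvReduceFull l) [] (by simpa using hrev)
    simpa using this
  rw [h1]
  by_cases hempty : pvReduceFull l = []
  · simp [hempty]
  · have hne : (pvReduceFull l).reverse ≠ [] := by simpa using hempty
    simp [hempty, List.length_eq_zero_iff]

-- ===== VERDICT (by name: the statement is the Claim_ definition above) =====
theorem findValidC_spec : Claim_equal_findValidC := by
  intro cp _
  unfold Spec_findValidC findValidC findValidC_alt
  exact List.map_congr_left (fun c _ => pv_string_agree c.toList)
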